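-- pv_equiv track=rewrite | github.com/samruddhi2026/JobGuard-AI | backend/app/services/scraper_service.py | _normalize_location_match
-- ===== SOURCE A (Python) =====
-- def _normalize_location_match(search_loc: str, target_loc: str, allow_remote: bool = False) -> bool:
--     """Intelligently matches search location against ATS location strings."""
--     if not search_loc: return True
--     s = search_loc.lower().strip()
--     t = target_loc.lower().strip()
--
--     # Remote always matches if the caller explicitly opts in
--     if allow_remote and "remote" in t:
--         return True
--
--     # Exact or substring match
--     if s in t: return True
--
--     # Alias Mapping
--     aliases = {
--         "usa": ["united states", "u.s.", "america", "new york", "san francisco", "california", "texas", "seattle", "chicago", "boston", "austin"],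
--         "us": ["united states", "usa", "u.s.", "america"],
--         "india": ["bengaluru", "bangalore", "mumbai", "delhi", "gurgaon", "gurugram", "pune", "hyderabad", "chennai", "noida", "kolkata"],
--         "uk": ["united kingdom", "london", "manchester", "birmingham", "britain", "england", "scotland", "glasgow"],
--         "germany": ["berlin", "munich", "münchen", "deutschland", "hamburg", "frankfurt", "cologne", "köln", "stuttgart"],
--         "canada": ["toronto", "vancouver", "montreal", "calgary", "ottawa"],
--         "australia": ["sydney", "melbourne", "brisbane", "perth", "canberra"],
--         "singapore": ["sg", "singapur"],
--         "france": ["paris", "lyon", "marseille"],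
--         "netherlands": ["amsterdam", "rotterdam", "the hague", "eindhoven"],
--         "brazil": ["são paulo", "sao paulo", "rio de janeiro", "brasília"],
--     }
--
--     for key, variants in aliases.items():
--         if s == key:
--             # If search is a country (e.g. "india"), match any city in that country
--             all_terms = [key] + variants
--             if any(term in t for term in all_terms):
--                 return True
--         elif s in variants:
--             # If search is a specific city (e.g. "pune"), ONLY match that city,
--             # the parent country name, or "remote". Do NOT match other cities.
--             if s in t or key in t:
--                 return True
--
--     return False
-- ===== SOURCE B (Python) =====
-- _ALIASES = {
--     "usa": ["united states", "u.s.", "america", "new york", "san francisco", "california", "texas", "seattle", "chicago", "boston", "austin"],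
--     "us": ["united states", "usa", "u.s.", "america"],
--     "india": ["bengaluru", "bangalore", "mumbai", "delhi", "gurgaon", "gurugram", "pune", "hyderabad", "chennai", "noida", "kolkata"],
--     "uk": ["united kingdom", "london", "manchester", "birmingham", "britain", "england", "scotland", "glasgow"],
--     "germany": ["berlin", "munich", "münchen", "deutschland", "hamburg", "frankfurt", "cologne", "köln", "stuttgart"],
--     "canada": ["toronto", "vancouver", "montreal", "calgary", "ottawa"],
--     "australia": ["sydney", "melbourne", "brisbane", "perth", "canberra"],
--     "singapore": ["sg", "singapur"],
--     "france": ["paris", "lyon", "marseille"],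
--     "netherlands": ["amsterdam", "rotterdam", "the hague", "eindhoven"],
--     "brazil": ["são paulo", "sao paulo", "rio de janeiro", "brasília"],
-- }
--
-- # Inverted index: city/alias variant -> list of country keys whose alias list contains it.
-- _CITY_INDEX = {}
-- for _key, _variants in _ALIASES.items():
--     for _city in _variants:
--         _CITY_INDEX.setdefault(_city, []).append(_key)
--
--
-- def _normalize_location_match(search_loc: str, target_loc: str, allow_remote: bool = False) -> bool:
--     """Intelligently matches search location against ATS location strings."""
--     if not search_loc:
--         return True
--     s = search_loc.lower().strip()
--     t = target_loc.lower().strip()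
--
--     if allow_remote and "remote" in t:
--         return True
--
--     if s in t:
--         return True
--
--     # Country path: keyed lookup instead of scanning the table.
--     variants = _ALIASES.get(s)
--     if variants is not None and any(term in t for term in [s] + variants):
--         return True
--
--     # City path: the precomputed inverted index names the parent countries directly.
--     return any(key in t for key in _CITY_INDEX.get(s, []))
-- ===== Notes on version B (the rewrite author's own statement) =====
-- stated objective: alternative
-- what changed: Replaces A's single linear scan over the alias table (branching per entry on key-equality and variant-membership) with two keyed lookups: a direct dict access for the country path and a one-time precomputed inverted city-to-countries index for the city path.
import Mathlib
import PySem

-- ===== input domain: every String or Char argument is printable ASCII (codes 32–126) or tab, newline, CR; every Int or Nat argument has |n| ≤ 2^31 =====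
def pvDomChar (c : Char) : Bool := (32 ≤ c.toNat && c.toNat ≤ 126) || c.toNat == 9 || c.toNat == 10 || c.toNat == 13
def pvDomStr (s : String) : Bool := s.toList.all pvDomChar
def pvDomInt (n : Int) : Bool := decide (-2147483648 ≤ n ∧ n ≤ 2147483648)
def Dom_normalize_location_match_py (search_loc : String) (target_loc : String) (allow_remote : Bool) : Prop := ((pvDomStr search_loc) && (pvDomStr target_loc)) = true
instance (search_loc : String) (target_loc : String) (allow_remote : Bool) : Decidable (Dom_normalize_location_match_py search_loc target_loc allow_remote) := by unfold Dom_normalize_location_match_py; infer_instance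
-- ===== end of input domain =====

-- B replaces A's linear scan of the alias table with a dict lookup (country path) plus a precomputed inverted city-to-countries index (city path); proved to return the same value on all inputs.


-- ===== PORT A =====
-- the alias table literal (both Pythons carry this same constant table)
def pvAliases : List (String × List String) := [
  ("usa", ["united states", "u.s.", "america", "new york", "san francisco", "california", "texas", "seattle", "chicago", "boston", "austin"]),
  ("us", ["united states", "usa", "u.s.", "america"]),
  ("india", ["bengaluru", "bangalore", "mumbai", "delhi", "gurgaon", "gurugram", "pune", "hyderabad", "chennai", "noida", "kolkata"]),
  ("uk", ["united kingdom", "london", "manchester", "birmingham", "britain", "england", "scotland", "glasgow"]),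
  ("germany", ["berlin", "munich", "münchen", "deutschland", "hamburg", "frankfurt", "cologne", "köln", "stuttgart"]),
  ("canada", ["toronto", "vancouver", "montreal", "calgary", "ottawa"]),
  ("australia", ["sydney", "melbourne", "brisbane", "perth", "canberra"]),
  ("singapore", ["sg", "singapur"]),
  ("france", ["paris", "lyon", "marseille"]),
  ("netherlands", ["amsterdam", "rotterdam", "the hague", "eindhoven"]),
  ("brazil", ["são paulo", "sao paulo", "rio de janeiro", "brasília"])]

-- x.lower().strip() (both Pythons normalize this way)
def pvNorm (x : String) : String := PySem.Str.strip (PySem.Str.lower x)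

-- A's 'for key, variants in aliases.items(): …' loop with its early returns
def pvALoop (s t : String) : List (String × List String) → Bool
  | [] => false
  | (key, variants) :: rest =>
    if s == key then
      if (key :: variants).any (fun term => PySem.Str.isIn term t) then true
      else pvALoop s t rest
    else if variants.contains s then
      if PySem.Str.isIn s t || PySem.Str.isIn key t then true
      else pvALoop s t rest
    else pvALoop s t rest

-- A's body after computing s and t
def pvATail (s t : String) (allow_remote : Bool) : Bool :=
  if allow_remote && PySem.Str.isIn "remote" t then true
  else if PySem.Str.isIn s t then true
  else pvALoop s t pvAliases

def normalize_location_match_py (search_loc : String) (target_loc : String) (allow_remote : Bool) : Bool :=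
  if search_loc == "" then true
  else pvATail (pvNorm search_loc) (pvNorm target_loc) allow_remote

-- ===== PORT B =====
-- the alias table as the dict _ALIASES, for keyed lookup
def pvAliasDict : PySem.Dict String (List String) := PySem.Dict.mk pvAliases

-- the inverted index, built once: for key, variants: for city: _CITY_INDEX.setdefault(city, []).append(key)
def pvCityIndex : PySem.Dict String (List String) :=
  pvAliases.foldl
    (fun d p => p.2.foldl (fun d city => d.modify city [] (fun l => l ++ [p.1])) d)
    PySem.Dict.empty

-- B's body after computing s and t: country path (dict lookup), then city path (inverted index)
def pvBTail (s t : String) (allow_remote : Bool) : Bool :=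
  if allow_remote && PySem.Str.isIn "remote" t then true
  else if PySem.Str.isIn s t then true
  else
    match pvAliasDict.get? s with
    | some variants =>
      if (s :: variants).any (fun term => PySem.Str.isIn term t) then true
      else (pvCityIndex.getD s []).any (fun key => PySem.Str.isIn key t)
    | none => (pvCityIndex.getD s []).any (fun key => PySem.Str.isIn key t)

def normalize_location_match_py_alt (search_loc : String) (target_loc : String) (allow_remote : Bool) : Bool :=
  if search_loc == "" then true
  else pvBTail (pvNorm search_loc) (pvNorm target_loc) allow_remote

-- ===== PRECONDITION & SPEC =====
def Spec_normalize_location_match_py (search_loc : String) (target_loc : String) (allow_remote : Bool) (out : Bool) : Prop := out = normalize_location_match_py_alt search_loc target_loc allow_remote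
instance (search_loc : String) (target_loc : String) (allow_remote : Bool) (out : Bool) : Decidable (Spec_normalize_location_match_py search_loc target_loc allow_remote out) := by unfold Spec_normalize_location_match_py; infer_instance

-- ===== CLAIM (what is proved, stated in full; the proofs are below) =====
def Claim_equal_normalize_location_match_py : Prop := ∀ (search_loc : String) (target_loc : String) (allow_remote : Bool), Dom_normalize_location_match_py search_loc target_loc allow_remote → Spec_normalize_location_match_py search_loc target_loc allow_remote (normalize_location_match_py search_loc target_loc allow_remote)

-- ===== LEMMAS AND PROOFS =====

-- A's loop is the disjunction, over the table, of its country clause and its city clause.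
theorem pvALoop_eq_any (s t : String) (L : List (String × List String)) :
    pvALoop s t L =
      L.any (fun p =>
        (s == p.1 && (p.1 :: p.2).any (fun term => PySem.Str.isIn term t)) ||
        (!(s == p.1) && p.2.contains s && (PySem.Str.isIn s t || PySem.Str.isIn p.1 t))) := by
  induction L with
  | nil => rfl
  | cons hd rest ih =>
    obtain ⟨key, variants⟩ := hd
    simp only [pvALoop, List.any_cons, ih]
    split_ifs with h1 h2 h3 h4 <;>
      simp_all only [Bool.not_eq_true, Bool.false_and, Bool.and_false,
        Bool.and_true, Bool.false_or, Bool.or_false, Bool.true_or, Bool.or_true,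
        Bool.not_true, Bool.not_false]

-- an `any` of a disjunction splits
theorem any_or_split {α : Type} (l : List α) (p q : α → Bool) :
    (l.any fun x => p x || q x) = (l.any p || l.any q) := by
  induction l with
  | nil => rfl
  | cons a l ih =>
    simp only [List.any_cons, ih]
    cases p a <;> cases q a <;> simp

-- pointwise-equal predicates (on members) give equal `any`
theorem any_congr_mem {α : Type} (l : List α) (f g : α → Bool) (h : ∀ a ∈ l, f a = g a) :
    l.any f = l.any g := by
  induction l with
  | nil => rfl
  | cons a l ih =>
    simp only [List.any_cons, h a (List.mem_cons_self), ih (fun x hx => h x (List.mem_cons_of_mem a hx))]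

-- a constant conjunct factors out of an `any`
theorem any_and_const {α : Type} (l : List α) (f : α → Bool) (b : Bool) :
    (l.any fun x => f x && b) = (l.any f && b) := by
  cases b <;> simp

-- the nested index-building loop is one flat foldl over (city, key) pairs
theorem foldl_nested_flat (L : List (String × List String)) (d : PySem.Dict String (List String)) :
    L.foldl (fun d p => p.2.foldl (fun d city => d.modify city [] (fun l => l ++ [p.1])) d) d =
      (L.flatMap fun p => p.2.map fun c => (c, p.1)).foldl
        (fun d q => d.modify q.1 [] (fun l => l ++ [q.2])) d := by
  induction L generalizing d with
  | nil => rfl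
  | cons p rest ih =>
    simp only [List.foldl_cons, List.flatMap_cons, List.foldl_append, List.foldl_map, ih]

-- the city path: inverted-index lookup = scan of the table for variant membership
theorem cityIndex_any (s t : String) :
    ((pvCityIndex.getD s []).any fun key => PySem.Str.isIn key t) =
      pvAliases.any (fun p => p.2.contains s && PySem.Str.isIn p.1 t) := by
  rw [pvCityIndex, foldl_nested_flat, PySem.Dict.getD_foldl_modify_append]
  rw [PySem.Dict.getD_empty, List.nil_append, List.any_map, List.any_filter, List.any_flatMap]
  refine any_congr_mem _ _ _ (fun p _ => ?_)
  rw [List.any_map]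
  show (p.2.any fun c => (c == s) && PySem.Str.isIn p.1 t) = _
  rw [any_and_const, List.any_beq']

-- the country path: first-match dict lookup = scan of the table for key equality, for distinct keys
theorem anyKey_get? (s t : String) :
    ∀ (L : List (String × List String)), (L.map Prod.fst).Nodup →
      (L.any fun p => s == p.1 && (p.1 :: p.2).any (fun term => PySem.Str.isIn term t)) =
        ((PySem.Dict.mk L).get? s).elim false
          (fun vs => (s :: vs).any (fun term => PySem.Str.isIn term t))
  | [], _ => rfl
  | (k, vs) :: rest, hnd => by
    have hnd' := hnd
    simp only [List.map_cons, List.nodup_cons] at hnd'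
    rw [List.any_cons, PySem.Dict.get?_mk_cons]
    by_cases h : k = s
    · subst h
      have hrest : (rest.any fun p => k == p.1 && (p.1 :: p.2).any fun term => PySem.Str.isIn term t) = false := by
        rw [List.any_eq_false]
        intro p hp
        have hne : k ≠ p.1 := fun he => hnd'.1 (he ▸ List.mem_map_of_mem hp)
        simp only [Bool.and_eq_true, beq_iff_eq, not_and]
        exact fun he => absurd he hne
      rw [hrest]
      have hkk : (k == k) = true := by simp
      simp only [hkk, if_true, Bool.true_and, Bool.or_false, Option.elim]
    · have hb : (s == k) = false := by simp [Ne.symm h]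
      have hb' : (k == s) = false := by simp [h]
      rw [if_neg (by simp [h] : ¬ ((k == s) = true)), hb]
      simp only [Bool.false_and, Bool.false_or]
      exact anyKey_get? s t rest hnd'.2

-- per-entry fact: no country key occurs in its own variant list
theorem keys_not_own_variant : ∀ p ∈ pvAliases, p.2.contains p.1 = false := by decide

-- keys of the table are distinct
theorem aliases_keys_nodup : (pvAliases.map Prod.fst).Nodup := by decide

-- the two tails agree
theorem tails_eq (s t : String) (r : Bool) : pvATail s t r = pvBTail s t r := by
  unfold pvATail pvBTail
  by_cases hr : (r && PySem.Str.isIn "remote" t) = true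
  · rw [if_pos hr, if_pos hr]
  · rw [if_neg hr, if_neg hr]
    by_cases hIn : PySem.Str.isIn s t = true
    · rw [if_pos hIn, if_pos hIn]
    · rw [if_neg hIn, if_neg hIn]
      have hIn' : PySem.Str.isIn s t = false := by simpa using hIn
      rw [pvALoop_eq_any, any_or_split]
      have hcity :
          (pvAliases.any fun p => !(s == p.1) && p.2.contains s && (PySem.Str.isIn s t || PySem.Str.isIn p.1 t)) =
            pvAliases.any (fun p => p.2.contains s && PySem.Str.isIn p.1 t) := by
        refine any_congr_mem _ _ _ (fun p hp => ?_)
        by_cases hk : (s == p.1) = true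
        · have : p.2.contains s = false := by
            have := keys_not_own_variant p hp
            rwa [(by simpa using hk : s = p.1)]
          simp only [hk, this, Bool.not_true, Bool.false_and]
        · have hk' : (s == p.1) = false := by simpa using hk
          simp only [hk', Bool.not_false, Bool.true_and, hIn', Bool.false_or]
      rw [hcity, cityIndex_any, anyKey_get? s t pvAliases aliases_keys_nodup]
      show (((PySem.Dict.mk pvAliases).get? s).elim false _ || _) = _
      rw [show pvAliasDict = PySem.Dict.mk pvAliases from rfl]
      cases hg : (PySem.Dict.mk pvAliases).get? s with
      | none => simp [Option.elim]
      | some vs =>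
        simp only [Option.elim]
        cases hc : (s :: vs).any (fun term => PySem.Str.isIn term t) <;> simp

-- ===== VERDICT (by name: the statement is the Claim_ definition above) =====
theorem normalize_location_match_py_spec : Claim_equal_normalize_location_match_py := by
  intro search_loc target_loc allow_remote _hdom
  unfold Spec_normalize_location_match_py
  unfold normalize_location_match_py normalize_location_match_py_alt
  by_cases he : (search_loc == "") = true
  · rw [if_pos he, if_pos he]
  · rw [if_neg he, if_neg he, tails_eq]
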